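-- pv_equiv track=rewrite | github.com/python-java-coding-test/programmers | week1/math_answers.py | get_one_answer
-- ===== SOURCE A (Python) =====
-- def get_one_answer(answer_length):
--     one_answers = []
--     cur_answer = 1
--     for x in range(answer_length):
--         one_answers.append(cur_answer)
--         if (cur_answer == 5):
--             cur_answer = 1
--         else:
--             cur_answer += 1
--     return one_answers
-- ===== SOURCE B (Python) =====
-- def get_one_answer(answer_length):
--     base = [1, 2, 3, 4, 5]
--     return (base * (answer_length // 5 + 1))[:answer_length]
-- ===== Notes on version B (the rewrite author's own statement) =====
-- stated objective: simpler
-- what changed: Replaces the per-element counter with reset branch by building the single period [1,2,3,4,5] once, tiling it with list multiplication, and truncating with a slice.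
import Mathlib
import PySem

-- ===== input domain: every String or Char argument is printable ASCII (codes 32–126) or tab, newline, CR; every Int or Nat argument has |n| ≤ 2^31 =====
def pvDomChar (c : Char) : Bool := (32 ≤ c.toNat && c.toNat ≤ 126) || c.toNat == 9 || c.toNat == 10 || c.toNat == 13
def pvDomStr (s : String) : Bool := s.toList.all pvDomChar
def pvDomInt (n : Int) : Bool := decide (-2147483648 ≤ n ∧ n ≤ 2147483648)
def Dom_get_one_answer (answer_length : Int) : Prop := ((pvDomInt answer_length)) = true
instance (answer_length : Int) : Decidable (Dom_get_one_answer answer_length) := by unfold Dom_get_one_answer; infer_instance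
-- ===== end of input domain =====

-- B builds the single period [1,2,3,4,5] once, tiles it and truncates with a slice,
-- replacing A's per-element counter with its reset branch (objective: simpler).

-- ===== PORT A =====
-- literal transliteration of A's loop: state (one_answers, cur_answer), one step per range element
def get_one_answer (answer_length : Int) : List Int :=
  ((PySem.List.pyRange 0 answer_length 1).foldl
    (fun (st : List Int × Int) _ =>
      (st.1 ++ [st.2], if st.2 = 5 then 1 else st.2 + 1))
    ([], 1)).1

-- ===== PORT B =====
-- literal transliteration of Source B: base * (answer_length // 5 + 1) then slice [:answer_length]
def get_one_answer_alt (answer_length : Int) : List Int :=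
  let base : List Int := [1, 2, 3, 4, 5]
  PySem.List.slice
    (List.flatten (List.replicate (PySem.Int.floordiv answer_length 5 + 1).toNat base))
    none (some answer_length)

-- ===== PRECONDITION & SPEC =====
def Spec_get_one_answer (answer_length : Int) (out : List Int) : Prop := out = get_one_answer_alt answer_length
instance (answer_length : Int) (out : List Int) : Decidable (Spec_get_one_answer answer_length out) := by unfold Spec_get_one_answer; infer_instance

-- ===== CLAIM (what is proved, stated in full; the proofs are below) =====
def Claim_equal_get_one_answer : Prop := ∀ (answer_length : Int), Dom_get_one_answer answer_length → Spec_get_one_answer answer_length (get_one_answer answer_length)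

-- ===== LEMMAS AND PROOFS =====

-- the value stream A's counter produces: m elements starting from counter value c
def cyc : Nat → Int → List Int
  | 0, _ => []
  | m + 1, c => c :: cyc m (if c = 5 then 1 else c + 1)

theorem foldA (l : List Int) (acc : List Int) (c : Int) :
    (l.foldl (fun (st : List Int × Int) _ =>
        (st.1 ++ [st.2], if st.2 = 5 then 1 else st.2 + 1)) (acc, c)).1
      = acc ++ cyc l.length c := by
  induction l generalizing acc c with
  | nil => simp [cyc]
  | cons x l ih => simp [List.foldl, ih, cyc]

theorem cyc_period (m : Nat) : cyc (m + 5) 1 = [1, 2, 3, 4, 5] ++ cyc m 1 := by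
  show cyc (m + 4 + 1) 1 = _
  simp [cyc]

theorem cyc_take : ∀ (k m : Nat), m ≤ 5 * k →
    cyc m 1 = (List.flatten (List.replicate k ([1, 2, 3, 4, 5] : List Int))).take m := by
  intro k
  induction k with
  | zero => intro m hm; interval_cases m; simp [cyc]
  | succ k ih =>
    intro m hm
    rcases Nat.lt_or_ge m 5 with h5 | h5
    · rw [List.replicate_succ, List.flatten_cons, List.take_append_of_le_length (by simp; omega)]
      interval_cases m <;> simp [cyc]
    · obtain ⟨m', rfl⟩ : ∃ m', m = m' + 5 := ⟨m - 5, by omega⟩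
      rw [cyc_period, List.replicate_succ, List.flatten_cons,
        show m' + 5 = ([1,2,3,4,5] : List Int).length + m' from by simp [Nat.add_comm],
        List.take_append, ih m' (by omega),
        List.take_of_length_le (l := ([1,2,3,4,5] : List Int)) (by simp)]
      simp

-- ===== VERDICT (by name: the statement is the Claim_ definition above) =====
theorem get_one_answer_spec : Claim_equal_get_one_answer := by
  intro n _
  unfold Spec_get_one_answer get_one_answer get_one_answer_alt
  rw [foldA, PySem.List.length_pyRange_one]
  rcases Int.lt_or_le n 0 with hn | hn
  · have hd : PySem.Int.floordiv n 5 = n / 5 := PySem.Int.floordiv_eq_ediv_of_pos (by omega)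
    have hm : (PySem.Int.floordiv n 5 + 1).toNat = 0 := by rw [hd]; omega
    rw [hm, show (n - 0).toNat = 0 by omega]
    simp [cyc, PySem.List.slice]
  · rw [PySem.List.slice_to _ hn]
    have hd : PySem.Int.floordiv n 5 = n / 5 := PySem.Int.floordiv_eq_ediv_of_pos (by omega)
    have hk : (PySem.Int.floordiv n 5 + 1).toNat = n.toNat / 5 + 1 := by
      rw [hd]; omega
    rw [hk, show (n - 0).toNat = n.toNat by omega]
    exact cyc_take _ _ (by omega)
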